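-- pv_equiv track=rewrite | github.com/inechakhin/nifazzer | util.py | find_index_of_char
-- ===== SOURCE A (Python) =====
-- def find_pair(string: str, right_char: str, left_idx: int) -> int:
--     left_char = string[left_idx]
--     curr_idx = left_idx + 1
--
--     if right_char == " " or left_char == "\"" or left_char == "*":
--         while curr_idx < len(string):
--             curr_char = string[curr_idx]
--             if curr_char == right_char:
--                 break
--             curr_idx = curr_idx + 1
--     else:
--         left_count = 0
--         while curr_idx < len(string):
--             curr_char = string[curr_idx]
--             if curr_char == right_char:
--                 if left_count == 0:
--                     break
--                 else:
--                     left_count = left_count - 1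
--             if curr_char == left_char:
--                 left_count = left_count + 1
--             curr_idx = curr_idx + 1
--
--     return curr_idx
--
-- def find_index_of_char(string: str, char: str) -> int:
--     i = 0
--     while i < len(string):
--         if string[i] == char:
--             return i
--         if string[i] == '"':
--             i = find_pair(string, '"', i)
--         i = i + 1
--     return i
-- ===== SOURCE B (Python) =====
-- def find_index_of_char(string: str, char: str) -> int:
--     in_quote = False
--     for i, c in enumerate(string):
--         if not in_quote and c == char:
--             return i
--         if c == '"':
--             in_quote = not in_quote
--     return len(string)
-- ===== Notes on version B (the rewrite author's own statement) =====
-- stated objective: simpler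
-- what changed: Replaces the nested find_pair jump helper with a single flat pass over enumerate(string) that maintains an in_quote boolean (no per-quote helper call and re-indexing), returning len(string) when the character is not found.
-- intended difference: On strings with an unterminated quote (odd number of '"') where char never occurs unquoted, A returns len(string)+1 (one past the end, an off-by-one from the jump helper stepping past the failed find_pair scan) while B returns the standard not-found index len(string), which is the intended value. — e.g. on find_index_of_char("\"a", "a"): A returns 3, B returns 2
import Mathlib
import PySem

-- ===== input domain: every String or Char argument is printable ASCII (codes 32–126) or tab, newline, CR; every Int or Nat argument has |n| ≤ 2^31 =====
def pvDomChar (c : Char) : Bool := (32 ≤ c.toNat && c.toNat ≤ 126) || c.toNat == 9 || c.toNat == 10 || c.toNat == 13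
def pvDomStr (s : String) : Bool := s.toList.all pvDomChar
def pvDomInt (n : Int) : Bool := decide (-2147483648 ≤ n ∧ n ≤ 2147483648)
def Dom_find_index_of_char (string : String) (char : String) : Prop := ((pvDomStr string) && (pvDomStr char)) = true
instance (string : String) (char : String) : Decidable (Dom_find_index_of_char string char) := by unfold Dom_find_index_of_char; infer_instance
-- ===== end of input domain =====

-- B replaces A's nested find_pair jump helper with one flat pass keeping an in_quote flag
-- (simpler, same cost); B returns len(string) instead of A's len(string)+1 on an
-- unterminated quote with no unquoted match — stated below as the intended difference D_.

-- ===== PORT A =====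

-- Python `string[i] == char` / `curr_char == right_char`: a one-char slice compared to a str.
def pyEqCS (c : Char) (t : String) : Bool := t.toList == [c]

-- inner while of find_pair, first branch
def fpLoop1 (s : List Char) (right_char : String) (curr : Nat) : Nat :=
  if h : curr < s.length then
    if pyEqCS s[curr] right_char then curr else fpLoop1 s right_char (curr + 1)
  else curr
termination_by s.length - curr
decreasing_by exact Nat.sub_succ_lt_self _ _ h

-- inner while of find_pair, second branch (left_count bookkeeping)
def fpLoop2 (s : List Char) (right_char : String) (left_char : Char)
    (left_count : Int) (curr : Nat) : Nat :=
  if h : curr < s.length then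
    if pyEqCS s[curr] right_char && left_count == 0 then curr
    else
      let lc1 := if pyEqCS s[curr] right_char then left_count - 1 else left_count
      let lc2 := if s[curr] = left_char then lc1 + 1 else lc1
      fpLoop2 s right_char left_char lc2 (curr + 1)
  else curr
termination_by s.length - curr
decreasing_by exact Nat.sub_succ_lt_self _ _ h

-- find_pair; every call site passes left_idx < s.length, so getD never takes its default
def find_pair (s : List Char) (right_char : String) (left_idx : Nat) : Nat :=
  let left_char := s.getD left_idx ' '
  if right_char == " " || left_char == '"' || left_char == '*' then
    fpLoop1 s right_char (left_idx + 1)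
  else
    fpLoop2 s right_char left_char 0 (left_idx + 1)

theorem fpLoop1_ge (s : List Char) (r : String) (curr : Nat) : curr ≤ fpLoop1 s r curr := by
  fun_induction fpLoop1 s r curr with
  | case1 => exact le_refl _
  | case2 _ _ _ ih => omega
  | case3 => exact le_refl _

theorem fpLoop2_ge (s : List Char) (r : String) (lc : Char) (cnt : Int) (curr : Nat) :
    curr ≤ fpLoop2 s r lc cnt curr := by
  fun_induction fpLoop2 s r lc cnt curr with
  | case1 => exact le_refl _
  | case2 _ _ _ _ ih => omega
  | case3 => exact le_refl _

theorem find_pair_ge (s : List Char) (r : String) (i : Nat) : i + 1 ≤ find_pair s r i := by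
  unfold find_pair
  dsimp only
  split
  · exact fpLoop1_ge s r (i + 1)
  · exact fpLoop2_ge s r _ 0 (i + 1)

-- the while loop of find_index_of_char
def fiocLoop (s : List Char) (char : String) (i : Nat) : Int :=
  if h : i < s.length then
    if pyEqCS s[i] char then (i : Int)
    else
      let i' := if s[i] = '"' then find_pair s "\"" i else i
      fiocLoop s char (i' + 1)
  else (i : Int)
termination_by s.length - i
decreasing_by
  have hle : i ≤ i' := by
    simp only [i']
    split
    · exact Nat.le_of_succ_le (find_pair_ge s "\"" i)
    · exact Nat.le_refl i
  exact Nat.sub_lt_sub_left h (Nat.lt_succ_of_le hle)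

def find_index_of_char (string : String) (char : String) : Int :=
  fiocLoop string.toList char 0

-- ===== PORT B =====

-- flat pass: return i at the first unquoted match, toggle in_quote on '"', else len(string)
def fiocAlt (l : List Char) (char : String) (i : Nat) (inq : Bool) : Int :=
  match l with
  | [] => (i : Int)
  | c :: rest =>
      if !inq && pyEqCS c char then (i : Int)
      else fiocAlt rest char (i + 1) (if c = '"' then !inq else inq)

def find_index_of_char_alt (string : String) (char : String) : Int :=
  fiocAlt string.toList char 0 false

-- ===== PRECONDITION & SPEC =====

-- On strings with an unterminated quote (odd number of '"') where char never occurs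
-- unquoted, A returns len(string)+1 (one past the end, an off-by-one from stepping past
-- the failed find_pair scan) while B returns the intended not-found index len(string).
def D_find_index_of_char (string : String) (char : String) : Prop :=
  string.toList.count '"' % 2 = 1 ∧
  ∀ j : Fin string.toList.length,
    [string.toList[j.1]] = char.toList → (string.toList.take j.1).count '"' % 2 = 1
instance (string : String) (char : String) : Decidable (D_find_index_of_char string char) := by
  unfold D_find_index_of_char; infer_instance

def Spec_find_index_of_char (string : String) (char : String) (out : Int) : Prop :=
  ¬ D_find_index_of_char string char → out = find_index_of_char_alt string char
instance (string : String) (char : String) (out : Int) :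
    Decidable (Spec_find_index_of_char string char out) := by
  unfold Spec_find_index_of_char; infer_instance

def pvDiffWitness_find_index_of_char : String × String := ("\"a", "a")
def pvDiffWitnessOut_find_index_of_char : Int × Int := (3, 2)

-- ===== CLAIM (what is proved, stated in full; the proofs are below) =====
def Claim_unchanged_find_index_of_char : Prop := ∀ (string : String) (char : String), Dom_find_index_of_char string char → Spec_find_index_of_char string char (find_index_of_char string char)
def Claim_changed_find_index_of_char : Prop := Dom_find_index_of_char (pvDiffWitness_find_index_of_char.1) (pvDiffWitness_find_index_of_char.2) ∧ D_find_index_of_char (pvDiffWitness_find_index_of_char.1) (pvDiffWitness_find_index_of_char.2) ∧ find_index_of_char (pvDiffWitness_find_index_of_char.1) (pvDiffWitness_find_index_of_char.2) = pvDiffWitnessOut_find_index_of_char.1 ∧ find_index_of_char_alt (pvDiffWitness_find_index_of_char.1) (pvDiffWitness_find_index_of_char.2) = pvDiffWitnessOut_find_index_of_char.2 ∧ pvDiffWitnessOut_find_index_of_char.1 ≠ pvDiffWitnessOut_find_index_of_char.2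
def Claim_exact_find_index_of_char : Prop := ∀ (string : String) (char : String), Dom_find_index_of_char string char → D_find_index_of_char string char → find_index_of_char string char ≠ find_index_of_char_alt string char

-- ===== LEMMAS AND PROOFS =====

theorem fpLoop1_le (s : List Char) (r : String) (curr : Nat) :
    curr ≤ s.length → fpLoop1 s r curr ≤ s.length := by
  fun_induction fpLoop1 s r curr with
  | case1 k h _ => intro _; omega
  | case2 k h _ ih => intro _; exact ih (by omega)
  | case3 k h => intro hk; simpa [fpLoop1, h] using hk

theorem pyEqCS_quote (c : Char) : pyEqCS c "\"" = (c == '"') := by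
  simp [pyEqCS, show ("\"".toList = ['"']) from rfl, BEq.comm]

theorem drop_cons (s : List Char) (k : Nat) (h : k < s.length) :
    s.drop k = s[k] :: s.drop (k + 1) := (List.getElem_cons_drop h).symm

theorem fiocAlt_cons_skip (c : Char) (rest : List Char) (char : String) (i : Nat) (inq : Bool)
    (hm : (!inq && pyEqCS c char) = false) :
    fiocAlt (c :: rest) char i inq = fiocAlt rest char (i + 1) (if c = '"' then !inq else inq) := by
  simp [fiocAlt, hm]

-- proof-side mirror of B's scan returning whether it ends still inside a quote
def unterm (l : List Char) (char : String) (inq : Bool) : Bool :=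
  match l with
  | [] => inq
  | c :: rest =>
      if !inq && pyEqCS c char then false
      else unterm rest char (if c = '"' then !inq else inq)

-- quote-skip: from inside a quote, B's scan advances to just past the '"' that fpLoop1 finds
theorem quoteSkipAlt (s : List Char) (char : String) (k : Nat) :
    k ≤ s.length →
    fiocAlt (s.drop k) char k true =
      if fpLoop1 s "\"" k < s.length then
        fiocAlt (s.drop (fpLoop1 s "\"" k + 1)) char (fpLoop1 s "\"" k + 1) false
      else (s.length : Int) := by
  fun_induction fpLoop1 s "\"" k with
  | case1 k h hq =>
    intro _
    rw [pyEqCS_quote] at hq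
    have hc : s[k] = '"' := by simpa using hq
    rw [drop_cons s k h, fiocAlt_cons_skip _ _ _ _ _ (by simp), if_pos hc, if_pos h]
    rfl
  | case2 k h hq ih =>
    intro _
    rw [pyEqCS_quote] at hq
    have hc : ¬ (s[k] = '"') := by simpa using hq
    rw [drop_cons s k h, fiocAlt_cons_skip _ _ _ _ _ (by simp), if_neg hc]
    exact ih (by omega)
  | case3 k h =>
    intro hk
    have hkl : k = s.length := by omega
    have hdrop : s.drop k = [] := List.drop_of_length_le (by omega)
    rw [hdrop, if_neg h, hkl]
    simp [fiocAlt]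

theorem quoteSkipUnterm (s : List Char) (char : String) (k : Nat) :
    unterm (s.drop k) char true =
      if fpLoop1 s "\"" k < s.length then
        unterm (s.drop (fpLoop1 s "\"" k + 1)) char false
      else true := by
  fun_induction fpLoop1 s "\"" k with
  | case1 k h hq =>
    rw [pyEqCS_quote] at hq
    have hc : s[k] = '"' := by simpa using hq
    rw [drop_cons s k h, if_pos h]
    simp [unterm, hc]
  | case2 k h hq ih =>
    rw [pyEqCS_quote] at hq
    have hc : ¬ (s[k] = '"') := by simpa using hq
    rw [drop_cons s k h]
    simp only [unterm, Bool.not_true, Bool.false_and, if_neg hc]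
    simpa using ih
  | case3 k h =>
    have hdrop : s.drop k = [] := List.drop_of_length_le (by omega)
    rw [hdrop, if_neg h]
    rfl

-- main invariant: A's loop = B's scan, plus 1 exactly when the scan ends inside a quote
theorem mainLoop (s : List Char) (char : String) (i : Nat) :
    fiocLoop s char i =
      fiocAlt (s.drop i) char i false +
        (if unterm (s.drop i) char false then 1 else 0) := by
  fun_induction fiocLoop s char i with
  | case1 i h hm =>
    rw [drop_cons s i h]
    simp [fiocAlt, unterm, hm]
  | case2 i h hm i' ih =>
    have hmf : pyEqCS s[i] char = false := by simpa using hm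
    rw [drop_cons s i h, fiocAlt_cons_skip _ _ _ _ _ (by simp [hmf])]
    have hu : unterm (s[i] :: s.drop (i + 1)) char false =
        unterm (s.drop (i + 1)) char (if s[i] = '"' then true else false) := by
      simp [unterm, hmf]
    rw [hu]
    by_cases hc : s[i] = '"'
    · -- quote: A jumps via find_pair, B toggles the flag and walks to the same place
      have hfp : i' = fpLoop1 s "\"" (i + 1) := by
        simp only [i', find_pair, List.getD_eq_getElem s ' ' h, hc]
        norm_num
      simp only [if_pos hc, Bool.not_false]
      rw [quoteSkipAlt s char (i + 1) (by omega), quoteSkipUnterm s char (i + 1)]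
      rw [hfp] at ih ⊢
      rcases Nat.lt_or_ge (fpLoop1 s "\"" (i + 1)) s.length with hlt | hge
      · rw [if_pos hlt, if_pos hlt]
        exact ih
      · have hfpe : fpLoop1 s "\"" (i + 1) = s.length := by
          have := fpLoop1_le s "\"" (i + 1) (by omega)
          omega
        have hdrop : s.drop (fpLoop1 s "\"" (i + 1) + 1) = [] :=
          List.drop_of_length_le (by omega)
        rw [if_neg (Nat.not_lt.mpr hge), if_neg (Nat.not_lt.mpr hge), ih, hdrop]
        simp [fiocAlt, unterm, hfpe]
    · have hi' : i' = i := by simp [i', hc]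
      simp only [if_neg hc]
      rw [hi'] at ih ⊢
      exact ih
  | case3 i h =>
    have hdrop : s.drop i = [] := List.drop_of_length_le (by omega)
    rw [hdrop]
    simp [fiocAlt, unterm]

-- unterm characterized by quote-count parity
theorem unterm_iff (l : List Char) (char : String) (inq : Bool) :
    unterm l char inq = true ↔
      ((l.count '"' + (if inq then 1 else 0)) % 2 = 1 ∧
       ∀ j : Fin l.length, [l[j.1]] = char.toList →
         ((l.take j.1).count '"' + (if inq then 1 else 0)) % 2 = 1) := by
  induction l generalizing inq with
  | nil =>
    cases inq <;> simp [unterm]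
  | cons c rest ih =>
    by_cases hm : (!inq && pyEqCS c char) = true
    · -- immediate unquoted match: both sides are false
      have hinq : inq = false := by
        rcases Bool.and_eq_true_iff.mp hm with ⟨h1, _⟩
        simpa using h1
      have hcl : [c] = char.toList := by
        rcases Bool.and_eq_true_iff.mp hm with ⟨_, h2⟩
        simp [pyEqCS] at h2
        exact h2.symm
      constructor
      · intro h
        exact absurd h (by simp [unterm, hm])
      · rintro ⟨_, hall⟩
        have h0 := hall ⟨0, by simp⟩ (by simpa using hcl)
        simp [hinq] at h0
    · -- no match here: step and use the IH with the toggled flag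
      have hstep : unterm (c :: rest) char inq
          = unterm rest char (if c = '"' then !inq else inq) := by
        simp only [unterm]
        rw [if_neg (by simpa using hm)]
      rw [hstep, ih]
      have hb : ∀ t : List Char,
          ((c :: t).count '"' + (if inq then 1 else 0)) % 2
            = (t.count '"' + (if (if c = '"' then !inq else inq) then 1 else 0)) % 2 := by
        intro t
        have hcount : (c :: t).count '"' = t.count '"' + (if c = '"' then 1 else 0) := by
          simp [List.count_cons]
        rw [hcount]
        by_cases hc : c = '"' <;> cases inq <;> simp [hc] <;> omega
      have hP0 : [c] = char.toList →
          (((c :: rest).take 0).count '"' + (if inq then 1 else 0)) % 2 = 1 := by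
        intro hcl
        have hpy : pyEqCS c char = true := by simp [pyEqCS, hcl.symm]
        have hinq : inq = true := by
          cases inq
          · exact absurd (by simp [hpy] : (!false && pyEqCS c char) = true) hm
          · rfl
        simp [hinq]
      constructor
      · rintro ⟨h1, h2⟩
        refine ⟨by rw [hb rest]; exact h1, ?_⟩
        intro j
        rcases j with ⟨jv, hj⟩
        match jv, hj with
        | 0, _ => exact hP0
        | (k+1), hj =>
          intro hmatch
          have hk : k < rest.length := by simpa using hj
          have := h2 ⟨k, hk⟩ (by simpa using hmatch)
          simpa [List.take_succ_cons, hb] using this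
      · rintro ⟨h1, h2⟩
        refine ⟨by rw [← hb rest]; exact h1, ?_⟩
        intro j hmatch
        have := h2 ⟨j.1 + 1, by simpa using j.2⟩ (by simpa using hmatch)
        simpa [List.take_succ_cons, hb] using this

theorem D_iff (string char : String) :
    D_find_index_of_char string char ↔ unterm string.toList char false = true := by
  rw [unterm_iff]
  unfold D_find_index_of_char
  simp

-- ===== VERDICT (by name: the statement is the Claim_ definition above) =====
theorem find_index_of_char_spec : Claim_unchanged_find_index_of_char := by
  intro string char _ hnd
  unfold find_index_of_char find_index_of_char_alt
  have h := mainLoop string.toList char 0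
  rw [D_iff] at hnd
  simp only [List.drop_zero] at h
  rw [h, if_neg (by simpa using hnd)]
  ring

-- fiocLoop/fpLoop1 are well-founded recursions, so the witness values are evaluated
-- by rewriting with their equations rather than by kernel reduction
theorem witness_A_val : find_index_of_char "\"a" "a" = 3 := by
  unfold find_index_of_char
  rw [show ("\"a".toList) = ['"', 'a'] from rfl]
  rw [fiocLoop.eq_def]
  norm_num [pyEqCS, find_pair]
  rw [fpLoop1.eq_def]
  norm_num [pyEqCS]
  rw [fpLoop1.eq_def]
  norm_num
  rw [fiocLoop.eq_def]
  norm_num [show ("a".toList)=['a'] from rfl, show ("\"".toList)=['"'] from rfl, pyEqCS]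
  decide

theorem find_index_of_char_changed : Claim_changed_find_index_of_char := by
  unfold Claim_changed_find_index_of_char
  refine ⟨by decide, by decide, ?_, by decide, by decide⟩
  exact witness_A_val

theorem find_index_of_char_tight : Claim_exact_find_index_of_char := by
  intro string char _ hd
  unfold find_index_of_char find_index_of_char_alt
  have h := mainLoop string.toList char 0
  rw [D_iff] at hd
  simp only [List.drop_zero] at h
  rw [h, if_pos hd]
  omega
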